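-- pv_equiv track=rewrite | github.com/zim-desktop-wiki/zim-desktop-wiki | zim/tokenparser.py | tokens_by_line
-- ===== SOURCE A (Python) =====
-- TEXT = 'T'
--
-- def tokens_by_line(tokens):
-- 	line = []
-- 	for t in tokens:
-- 		line.append(t)
-- 		if t[0] == TEXT and t[1].endswith('\n'):
-- 			yield line
-- 			line = []
-- 	if line:
-- 		yield line
-- ===== SOURCE B (Python) =====
-- TEXT = 'T'
--
-- def tokens_by_line(tokens):
--     # Two-pass: precompute the break positions, then emit slices between them.
--     tokens = list(tokens)
--     breaks = [i for i, t in enumerate(tokens) if t[0] == TEXT and t[1].endswith('\n')]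
--     start = 0
--     for b in breaks:
--         yield tokens[start:b + 1]
--         start = b + 1
--     if start < len(tokens):
--         yield tokens[start:]
-- ===== Notes on version B (the rewrite author's own statement) =====
-- stated objective: alternative
-- what changed: Replaces A's single accumulate-and-reset pass (appending tokens to a growing current line) by two passes: first precompute the list of break indices with enumerate, then emit the slices of the materialized token list between consecutive breaks.
import Mathlib
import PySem

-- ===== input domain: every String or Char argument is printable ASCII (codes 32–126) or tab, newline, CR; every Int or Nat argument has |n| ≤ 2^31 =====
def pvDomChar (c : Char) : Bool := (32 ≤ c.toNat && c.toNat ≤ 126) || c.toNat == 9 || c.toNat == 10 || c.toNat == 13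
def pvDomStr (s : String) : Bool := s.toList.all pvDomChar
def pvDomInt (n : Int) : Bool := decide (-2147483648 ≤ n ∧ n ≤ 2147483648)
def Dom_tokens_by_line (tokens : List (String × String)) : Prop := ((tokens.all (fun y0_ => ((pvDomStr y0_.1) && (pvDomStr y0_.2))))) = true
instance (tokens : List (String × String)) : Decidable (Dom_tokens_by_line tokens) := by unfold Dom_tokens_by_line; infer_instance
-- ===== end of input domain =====

-- B replaces A's single accumulate-and-reset pass by an index-precompute pass plus a slicing
-- pass (objective: alternative decomposition, same cost); return values are proved equal.

-- ===== PORT A =====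
-- loop of A: one token at a time, appending to the current `line`, emitting it at a break
def pvAgo : List (String × String) → List (String × String) → List (List (String × String))
  | [], line => if line.isEmpty then [] else [line]
  | t :: ts, line =>
      let line' := line ++ [t]
      if t.1 == "T" && PySem.Str.endswith t.2 "\n" then
        line' :: pvAgo ts []
      else
        pvAgo ts line'

def tokens_by_line (tokens : List (String × String)) : List (List (String × String)) :=
  pvAgo tokens []

-- ===== PORT B =====
def tokens_by_line_alt (tokens : List (String × String)) : List (List (String × String)) :=
  let breaks := ((PySem.List.enumerate tokens 0).filter
      (fun p => p.2.1 == "T" && PySem.Str.endswith p.2.2 "\n")).map (·.1)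
  let r := breaks.foldl
      (fun (s : List (List (String × String)) × Int) b =>
        (s.1 ++ [PySem.List.slice tokens (some s.2) (some (b + 1))], b + 1)) ([], 0)
  if r.2 < (tokens.length : Int) then r.1 ++ [PySem.List.slice tokens (some r.2) none] else r.1

-- ===== PRECONDITION & SPEC =====
def Spec_tokens_by_line (tokens : List (String × String)) (out : List (List (String × String))) : Prop := out = tokens_by_line_alt tokens
instance (tokens : List (String × String)) (out : List (List (String × String))) : Decidable (Spec_tokens_by_line tokens out) := by unfold Spec_tokens_by_line; infer_instance

-- ===== CLAIM (what is proved, stated in full; the proofs are below) =====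
def Claim_equal_tokens_by_line : Prop := ∀ (tokens : List (String × String)), Dom_tokens_by_line tokens → Spec_tokens_by_line tokens (tokens_by_line tokens)

-- ===== LEMMAS AND PROOFS =====

-- canonical grouping both ports are reduced to
def pvBrk (t : String × String) : Bool := t.1 == "T" && PySem.Str.endswith t.2 "\n"

def pvGrp : List (String × String) → List (List (String × String))
  | [] => []
  | t :: ts =>
      if pvBrk t then [t] :: pvGrp ts
      else
        match pvGrp ts with
        | [] => [[t]]
        | g :: gs => (t :: g) :: gs

def pvAttach (line : List (String × String)) : List (List (String × String)) → List (List (String × String))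
  | [] => if line.isEmpty then [] else [line]
  | g :: gs => (line ++ g) :: gs

theorem pvAgo_eq (ts : List (String × String)) :
    ∀ line, pvAgo ts line = pvAttach line (pvGrp ts) := by
  induction ts with
  | nil => intro line; rfl
  | cons t ts ih =>
      intro line
      by_cases h : pvBrk t = true
      · simp only [pvAgo, pvGrp, pvBrk] at *
        simp only [h, if_true, ih]
        cases hg : pvGrp ts with
        | nil => simp [pvAttach]
        | cons g gs => simp [pvAttach]
      · simp only [pvAgo, pvGrp, pvBrk] at *
        simp only [h, if_false, ih]
        cases hg : pvGrp ts with
        | nil => simp [pvAttach]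
        | cons g gs => simp [pvAttach]

-- B side: Nat-indexed break positions
def pvBreaks : List (String × String) → List Nat
  | [] => []
  | t :: ts =>
      if pvBrk t then 0 :: (pvBreaks ts).map (· + 1)
      else (pvBreaks ts).map (· + 1)

theorem pvEnum_breaks (ts : List (String × String)) :
    ∀ s : Int, (((PySem.List.enumerate ts s).filter (fun p => pvBrk p.2)).map (·.1))
      = (pvBreaks ts).map (fun k : Nat => s + (k : Int)) := by
  induction ts with
  | nil => intro s; simp [PySem.List.enumerate_nil, pvBreaks]
  | cons t ts ih =>
      intro s
      rw [PySem.List.enumerate_cons]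
      by_cases h : pvBrk t = true
      · rw [List.filter_cons_of_pos (by simpa using h), List.map_cons, ih (s + 1)]
        simp only [pvBreaks, h, if_true, List.map_cons, List.map_map]
        refine List.cons_eq_cons.mpr ⟨by simp, ?_⟩
        apply List.map_congr_left
        intro k _
        simp only [Function.comp_apply]
        push_cast
        ring
      · rw [List.filter_cons_of_neg (by simpa using h), ih (s + 1)]
        simp only [pvBreaks, h, Bool.false_eq_true, if_false, List.map_map]
        apply List.map_congr_left
        intro k _
        simp only [Function.comp_apply]
        push_cast
        ring

-- segments between break positions
def pvSegs (tokens : List (String × String)) : Nat → List Nat → List (List (String × String))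
  | s, [] => if s < tokens.length then [tokens.drop s] else []
  | s, b :: bs => (tokens.drop s).take (b + 1 - s) :: pvSegs tokens (b + 1) bs

theorem pvFold_segs (tokens : List (String × String)) (bs : List Nat) :
    ∀ (out : List (List (String × String))) (s : Nat),
      (let r := (bs.map (fun k : Nat => (k : Int))).foldl
          (fun (st : List (List (String × String)) × Int) b =>
            (st.1 ++ [PySem.List.slice tokens (some st.2) (some (b + 1))], b + 1)) (out, (s : Int));
        if r.2 < (tokens.length : Int) then r.1 ++ [PySem.List.slice tokens (some r.2) none] else r.1)
      = out ++ pvSegs tokens s bs := by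
  induction bs with
  | nil =>
      intro out s
      simp only [List.map_nil, List.foldl_nil, pvSegs]
      by_cases h : s < tokens.length
      · rw [if_pos (by exact_mod_cast h), if_pos h, PySem.List.slice_from_natCast]
      · rw [if_neg (by exact_mod_cast h), if_neg h, List.append_nil]
  | cons b bs ih =>
      intro out s
      simp only [List.map_cons, List.foldl_cons]
      have h1 : ((b : Int) + 1) = ((b + 1 : Nat) : Int) := by push_cast; ring
      rw [h1, PySem.List.slice_natCast]
      have := ih (out ++ [(tokens.drop s).take (b + 1 - s)]) (b + 1)
      simp only at this ⊢
      rw [this, pvSegs, List.append_assoc, List.singleton_append]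

theorem pvSegs_shift (t : String × String) (ts : List (String × String)) (bs : List Nat) :
    ∀ s : Nat, pvSegs (t :: ts) (s + 1) (bs.map (· + 1)) = pvSegs ts s bs := by
  induction bs with
  | nil =>
      intro s
      simp only [List.map_nil, pvSegs, List.length_cons, List.drop_succ_cons,
        Nat.add_lt_add_iff_right]
  | cons b bs ih =>
      intro s
      simp only [List.map_cons, pvSegs, List.drop_succ_cons, ih (b + 1)]
      congr 2
      omega

theorem pvSegs_grp (ts : List (String × String)) :
    pvSegs ts 0 (pvBreaks ts) = pvGrp ts := by
  induction ts with
  | nil => rfl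
  | cons t ts ih =>
      by_cases h : pvBrk t = true
      · have h1 : pvSegs (t :: ts) 1 ((pvBreaks ts).map (· + 1)) = pvSegs ts 0 (pvBreaks ts) :=
          pvSegs_shift t ts (pvBreaks ts) 0
        simp only [pvBreaks, pvGrp, h, if_true, pvSegs, List.drop_zero, h1, ih]
        simp
      · simp only [pvBreaks, pvGrp, h, if_false]
        rw [← ih]
        cases hb : pvBreaks ts with
        | nil =>
            cases ts with
            | nil => simp [pvSegs]
            | cons u us => simp [pvSegs]
        | cons b bs =>
            have h1 : pvSegs (t :: ts) (b + 1 + 1) (bs.map (· + 1)) = pvSegs ts (b + 1) bs :=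
              pvSegs_shift t ts bs (b + 1)
            have h2 : b + 1 + 1 - 0 = (b + 1 - 0) + 1 := by omega
            simp [pvSegs, h2, h1, List.take_succ_cons]

theorem pvAlt_eq_grp (tokens : List (String × String)) :
    tokens_by_line_alt tokens = pvGrp tokens := by
  unfold tokens_by_line_alt
  have he : (((PySem.List.enumerate tokens 0).filter
      (fun p => p.2.1 == "T" && PySem.Str.endswith p.2.2 "\n")).map (·.1))
      = (pvBreaks tokens).map (fun k : Nat => (k : Int)) := by
    have h0 := pvEnum_breaks tokens 0
    simp only [pvBrk] at h0
    simpa using h0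
  have h1 := pvFold_segs tokens (pvBreaks tokens) [] 0
  simp only [Nat.cast_zero, List.nil_append] at h1
  simp only [he, h1, pvSegs_grp]

-- ===== VERDICT (by name: the statement is the Claim_ definition above) =====
theorem tokens_by_line_spec : Claim_equal_tokens_by_line := by
  intro tokens _
  unfold Spec_tokens_by_line tokens_by_line
  rw [pvAlt_eq_grp, pvAgo_eq]
  cases h : pvGrp tokens with
  | nil => rfl
  | cons g gs => simp [pvAttach]
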